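-- pv_equiv track=rewrite | github.com/biruwon/dimetuverdad | analyzer/local_analyzer.py | _has_only_videos
-- ===== SOURCE A (Python) =====
-- from typing import Tuple, Optional, List, Dict
--
-- def _has_only_videos(media_urls: List[str]) -> bool:
--     """
--     Check if media URLs contain only videos (no processable images).
--     Local multimodal models only support images, not videos.
--
--     Args:
--         media_urls: List of media URLs
--
--     Returns:
--         True if all URLs are videos (no images found), False otherwise
--     """
--     if not media_urls:
--         return False
--
--     # Check for video extensions and formats
--     video_extensions = ['.mp4', '.m3u8', '.mov', '.avi', '.webm', '.m4v', '.flv', '.wmv']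
--     video_formats = ['format=mp4', 'format=m3u8', 'format=mov', 'format=avi', 'format=webm', 'format=m4v', 'format=flv', 'format=wmv']
--     image_extensions = ['.jpg', '.jpeg', '.png', '.gif', '.webp', '.bmp', '.tiff', '.svg']
--     image_formats = ['format=jpg', 'format=jpeg', 'format=png', 'format=gif', 'format=webp', 'format=bmp', 'format=tiff', 'format=svg']
--
--     has_videos = False
--     has_images = False
--
--     for url in media_urls:
--         url_lower = url.lower()
--
--         # Check for image extensions first (more reliable than keywords)
--         # This includes video thumbnails which have image extensions (.jpg, .png, etc.)
--         if (any(ext in url_lower for ext in image_extensions) or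
--             any(fmt in url_lower for fmt in image_formats)):
--             has_images = True
--         # Then check if it's a video (extensions or format parameters)
--         # Note: 'video' keyword check removed because it catches video thumbnails
--         elif (any(ext in url_lower for ext in video_extensions) or
--               any(fmt in url_lower for fmt in video_formats)):
--             has_videos = True
--
--     # Return True only if we have videos but no images
--     return has_videos and not has_images
-- ===== SOURCE B (Python) =====
-- from typing import List
--
-- _IMAGE_MARKERS = ['.jpg', '.jpeg', '.png', '.gif', '.webp', '.bmp', '.tiff', '.svg',
--                   'format=jpg', 'format=jpeg', 'format=png', 'format=gif',
--                   'format=webp', 'format=bmp', 'format=tiff', 'format=svg']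
-- _VIDEO_MARKERS = ['.mp4', '.m3u8', '.mov', '.avi', '.webm', '.m4v', '.flv', '.wmv',
--                   'format=mp4', 'format=m3u8', 'format=mov', 'format=avi',
--                   'format=webm', 'format=m4v', 'format=flv', 'format=wmv']
--
-- def _has_only_videos(media_urls: List[str]) -> bool:
--     # Marker-driven scan: lowercase the URLs once, then iterate over the marker
--     # tables (outer loop over markers, inner over URLs), bailing out on the
--     # first image marker present anywhere.
--     lowered = [u.lower() for u in media_urls]
--     for m in _IMAGE_MARKERS:
--         if any(m in u for u in lowered):
--             return False
--     for m in _VIDEO_MARKERS: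
--         if any(m in u for u in lowered):
--             return True
--     return False
-- ===== Notes on version B (the rewrite author's own statement) =====
-- stated objective: alternative
-- what changed: Inverts the traversal: instead of A's single URL loop mutating two flags with an if/elif, B lowercases the URL list once and then iterates over the marker tables (outer loop over the 16 image markers then the 16 video markers, inner any() over the URLs), returning False on the first image marker found anywhere and True on the first video marker otherwise. (constant-factor speedup: the inner membership scan runs inside any() over a precomputed lowered list instead of per-URL Python-level branching).
import Mathlib
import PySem

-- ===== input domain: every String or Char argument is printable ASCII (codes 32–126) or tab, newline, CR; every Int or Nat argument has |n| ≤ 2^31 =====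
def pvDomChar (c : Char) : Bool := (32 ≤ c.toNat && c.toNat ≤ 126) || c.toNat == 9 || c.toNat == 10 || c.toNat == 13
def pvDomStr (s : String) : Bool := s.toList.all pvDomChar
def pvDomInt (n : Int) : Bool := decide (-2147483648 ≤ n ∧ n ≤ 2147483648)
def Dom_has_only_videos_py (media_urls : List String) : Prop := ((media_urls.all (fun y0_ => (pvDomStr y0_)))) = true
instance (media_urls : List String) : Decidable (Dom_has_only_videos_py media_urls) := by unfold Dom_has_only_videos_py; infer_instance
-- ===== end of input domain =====

-- B inverts the traversal: markers outer, URLs inner, over a once-lowered list, with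
-- early exit on the first image marker (objective: alternative); return values proved equal.

-- ===== PORT A =====
def pvVideoExtensions : List String := [".mp4", ".m3u8", ".mov", ".avi", ".webm", ".m4v", ".flv", ".wmv"]
def pvVideoFormats : List String := ["format=mp4", "format=m3u8", "format=mov", "format=avi", "format=webm", "format=m4v", "format=flv", "format=wmv"]
def pvImageExtensions : List String := [".jpg", ".jpeg", ".png", ".gif", ".webp", ".bmp", ".tiff", ".svg"]
def pvImageFormats : List String := ["format=jpg", "format=jpeg", "format=png", "format=gif", "format=webp", "format=bmp", "format=tiff", "format=svg"]

-- loop body of A: state = (has_videos, has_images)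
def pvStepA (st : Bool × Bool) (url : String) : Bool × Bool :=
  let url_lower := PySem.Str.lower url
  if pvImageExtensions.any (fun ext => PySem.Str.isIn ext url_lower)
     || pvImageFormats.any (fun fmt => PySem.Str.isIn fmt url_lower) then
    (st.1, true)
  else if pvVideoExtensions.any (fun ext => PySem.Str.isIn ext url_lower)
     || pvVideoFormats.any (fun fmt => PySem.Str.isIn fmt url_lower) then
    (true, st.2)
  else st

def has_only_videos_py (media_urls : List String) : Bool :=
  if media_urls = [] then false
  else
    let st := media_urls.foldl pvStepA (false, false)
    st.1 && !st.2

-- ===== PORT B =====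
def pvImageMarkers : List String := [".jpg", ".jpeg", ".png", ".gif", ".webp", ".bmp", ".tiff", ".svg",
  "format=jpg", "format=jpeg", "format=png", "format=gif", "format=webp", "format=bmp", "format=tiff", "format=svg"]
def pvVideoMarkers : List String := [".mp4", ".m3u8", ".mov", ".avi", ".webm", ".m4v", ".flv", ".wmv",
  "format=mp4", "format=m3u8", "format=mov", "format=avi", "format=webm", "format=m4v", "format=flv", "format=wmv"]

-- the two marker-driven early-exit loops of Source B (any over markers = first marker hit wins)
def has_only_videos_py_alt (media_urls : List String) : Bool :=
  let lowered := media_urls.map PySem.Str.lower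
  if pvImageMarkers.any (fun m => lowered.any (fun u => PySem.Str.isIn m u)) then false
  else pvVideoMarkers.any (fun m => lowered.any (fun u => PySem.Str.isIn m u))

-- ===== PRECONDITION & SPEC =====
def Spec_has_only_videos_py (media_urls : List String) (out : Bool) : Prop := out = has_only_videos_py_alt media_urls
instance (media_urls : List String) (out : Bool) : Decidable (Spec_has_only_videos_py media_urls out) := by unfold Spec_has_only_videos_py; infer_instance

-- ===== CLAIM (what is proved, stated in full; the proofs are below) =====
def Claim_equal_has_only_videos_py : Prop := ∀ (media_urls : List String), Dom_has_only_videos_py media_urls → Spec_has_only_videos_py media_urls (has_only_videos_py media_urls)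

-- ===== LEMMAS AND PROOFS =====

-- per-URL predicates used only in the proof, to bridge the two loop orders
def pvIsImage (url : String) : Bool :=
  pvImageMarkers.any (fun m => PySem.Str.isIn m (PySem.Str.lower url))
def pvIsVideo (url : String) : Bool :=
  pvVideoMarkers.any (fun m => PySem.Str.isIn m (PySem.Str.lower url))

-- swapping the two any-quantifiers
theorem pvAnyComm {α β : Type} (xs : List α) (ys : List β) (p : α → β → Bool) :
    (xs.any fun x => ys.any fun y => p x y) = (ys.any fun y => xs.any fun x => p x y) := by
  rw [Bool.eq_iff_iff]
  simp only [List.any_eq_true]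
  tauto

theorem pvAltEq (urls : List String) :
    has_only_videos_py_alt urls = (!urls.any pvIsImage && urls.any pvIsVideo) := by
  unfold has_only_videos_py_alt
  simp only []
  rw [pvAnyComm pvImageMarkers (urls.map PySem.Str.lower),
      pvAnyComm pvVideoMarkers (urls.map PySem.Str.lower)]
  simp only [List.any_map, Function.comp_def]
  show (if urls.any pvIsImage = true then false else urls.any pvIsVideo) = _
  cases h : urls.any pvIsImage <;> simp [h]

-- A's loop body expressed with the per-URL predicates
theorem pvStepA_eq (st : Bool × Bool) (url : String) :
    pvStepA st url = (st.1 || (!pvIsImage url && pvIsVideo url), st.2 || pvIsImage url) := by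
  have himg : pvIsImage url =
      (pvImageExtensions.any (fun ext => PySem.Str.isIn ext (PySem.Str.lower url))
        || pvImageFormats.any (fun fmt => PySem.Str.isIn fmt (PySem.Str.lower url))) := by
    simp [pvIsImage, pvImageMarkers, pvImageExtensions, pvImageFormats,
      List.any_cons, List.any_nil, Bool.or_assoc]
  have hvid : pvIsVideo url =
      (pvVideoExtensions.any (fun ext => PySem.Str.isIn ext (PySem.Str.lower url))
        || pvVideoFormats.any (fun fmt => PySem.Str.isIn fmt (PySem.Str.lower url))) := by
    simp [pvIsVideo, pvVideoMarkers, pvVideoExtensions, pvVideoFormats,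
      List.any_cons, List.any_nil, Bool.or_assoc]
  simp only [pvStepA]
  rw [← himg, ← hvid]
  cases hI : pvIsImage url <;> cases hV : pvIsVideo url <;> cases st <;> simp

theorem pvFoldA (urls : List String) (v i : Bool) :
    urls.foldl pvStepA (v, i) =
      (v || urls.any (fun u => !pvIsImage u && pvIsVideo u), i || urls.any pvIsImage) := by
  induction urls generalizing v i with
  | nil => simp
  | cons u us ih =>
    simp only [List.foldl_cons, List.any_cons, pvStepA_eq]
    rw [ih]
    simp [Bool.or_assoc]

theorem pvAny_video_of_no_image (urls : List String) (h : urls.any pvIsImage = false) :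
    urls.any (fun u => !pvIsImage u && pvIsVideo u) = urls.any pvIsVideo := by
  simp only [List.any_eq_false] at h
  induction urls with
  | nil => rfl
  | cons u us ih =>
    simp only [List.any_cons, h u (List.mem_cons_self ..)]
    rw [ih (fun x hx => h x (List.mem_cons_of_mem _ hx))]
    simp

-- ===== VERDICT (by name: the statement is the Claim_ definition above) =====
theorem has_only_videos_py_spec : Claim_equal_has_only_videos_py := by
  intro media_urls _
  unfold Spec_has_only_videos_py
  rw [pvAltEq]
  unfold has_only_videos_py
  cases media_urls with
  | nil => simp
  | cons u us =>
    simp only [if_neg (List.cons_ne_nil u us), pvFoldA, Bool.false_or]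
    cases h : (u :: us).any pvIsImage with
    | false => rw [pvAny_video_of_no_image _ h]; simp
    | true => simp
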